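-- pv_equiv track=rewrite | github.com/HEXtriple/Skola-Programmering1 | Prov1/ovningsprov1.py | ASLINATOR6000
-- ===== SOURCE A (Python) =====
-- ASLI = "bcdfghjklmnpqrstvwxz"
--
-- def ASLINATOR6000(stri):
--     new_str = ""
--     for i in stri:
--         if i in ASLI:
--             new_str += f"{i}o{i}"
--         else:
--             new_str += i
--     return new_str
-- ===== SOURCE B (Python) =====
-- ASLI = "bcdfghjklmnpqrstvwxz"
--
-- # Staged rewriting: one whole-string replace pass per consonant (20 passes),
-- # instead of one pass over the characters. Correct because the inserted vowel is
-- # not a consonant and each consonant is processed exactly once, so no pass can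
-- # touch text inserted by an earlier (or its own) pass again.
-- def ASLINATOR6000(stri):
--     for c in ASLI:
--         stri = stri.replace(c, c + "o" + c)
--     return stri
-- ===== Notes on version B (the rewrite author's own statement) =====
-- stated objective: faster
-- what changed: Replaces A's single per-character Python loop with branch-and-append by 20 staged whole-string str.replace passes, one per consonant; correct since the inserted vowel is never a consonant and each consonant is rewritten exactly once.
import Mathlib
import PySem

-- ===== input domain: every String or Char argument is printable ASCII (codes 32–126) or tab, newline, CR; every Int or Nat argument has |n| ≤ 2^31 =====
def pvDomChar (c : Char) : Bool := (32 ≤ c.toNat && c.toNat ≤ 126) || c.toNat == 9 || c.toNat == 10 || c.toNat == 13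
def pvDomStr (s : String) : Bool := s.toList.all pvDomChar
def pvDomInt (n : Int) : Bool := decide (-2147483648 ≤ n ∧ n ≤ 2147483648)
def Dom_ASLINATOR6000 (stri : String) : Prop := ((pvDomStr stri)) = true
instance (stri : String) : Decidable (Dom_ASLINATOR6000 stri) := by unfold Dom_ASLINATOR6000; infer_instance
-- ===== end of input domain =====

-- B replaces A's single per-character loop by 20 staged whole-string replace passes, one per consonant (alternative decomposition, same result).


-- ===== PORT A =====
def ASLI : String := "bcdfghjklmnpqrstvwxz"

-- literal port of A's loop; `i in ASLI` for a single char i is char membership (exact);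
-- the string accumulator is kept as List Char and wrapped with String.ofList at the end.
def ASLINATOR6000 (stri : String) : String :=
  String.ofList (stri.toList.foldl
    (fun new_str i =>
      if ASLI.toList.contains i then new_str ++ [i, 'o', i] else new_str ++ [i]) [])

-- ===== PORT B =====
-- Source B's loop `for c in ASLI: stri = stri.replace(c, c+'o'+c)`, one replace pass per consonant.
def ASLINATOR6000_alt (stri : String) : String :=
  ASLI.toList.foldl
    (fun s c => PySem.Str.replace s (String.ofList [c]) (String.ofList [c, 'o', c])) stri

-- ===== PRECONDITION & SPEC =====
def Spec_ASLINATOR6000 (stri : String) (out : String) : Prop := out = ASLINATOR6000_alt stri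
instance (stri : String) (out : String) : Decidable (Spec_ASLINATOR6000 stri out) := by unfold Spec_ASLINATOR6000; infer_instance

-- ===== CLAIM (what is proved, stated in full; the proofs are below) =====
def Claim_equal_ASLINATOR6000 : Prop := ∀ (stri : String), Dom_ASLINATOR6000 stri → Spec_ASLINATOR6000 stri (ASLINATOR6000 stri)

-- ===== LEMMAS AND PROOFS =====

-- per-character substitution determined by a processed set P of consonants
def subst (P : List Char) (x : Char) : List Char :=
  if P.contains x then [x, 'o', x] else [x]

-- single-char replace is a character-wise flatMap
theorem replace_go_single (c : Char) (nv : List Char) :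
    ∀ (l acc : List Char) (fuel : Nat), l.length ≤ fuel →
      PySem.Chars.replace.go [c] nv fuel l acc
        = acc.reverse ++ l.flatMap (fun x => if x = c then nv else [x]) := by
  intro l
  induction l with
  | nil =>
    intro acc fuel _
    cases fuel <;> simp [PySem.Chars.replace.go]
  | cons x t ih =>
    intro acc fuel hf
    cases fuel with
    | zero => simp at hf
    | succ n =>
      simp only [PySem.Chars.replace.go]
      by_cases hx : x = c
      · subst hx
        have hp : [x].isPrefixOf (x :: t) = true := by simp [List.isPrefixOf]
        rw [if_pos hp]
        simp only [List.length_cons, List.length_nil, List.drop_succ_cons, List.drop_zero]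
        rw [ih (nv.reverse ++ acc) n (by simpa using Nat.le_of_succ_le_succ hf)]
        simp
      · have hp : [c].isPrefixOf (x :: t) = false := by
          simp [List.isPrefixOf]; exact fun h => absurd h.symm hx
        rw [if_neg (by simp [hp])]
        rw [ih (x :: acc) n (by simpa using Nat.le_of_succ_le_succ hf)]
        simp [hx]

theorem replace_single (c : Char) (nv s : List Char) :
    PySem.Chars.replace s [c] nv = s.flatMap (fun x => if x = c then nv else [x]) := by
  rw [PySem.Chars.replace]
  simp only [List.isEmpty_cons, if_false, Bool.false_eq_true]
  simpa using replace_go_single c nv s [] s.length le_rfl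

-- one replace pass extends the processed set by c
theorem subst_step (P : List Char) (c : Char) (hc : c ∉ P) (hco : c ≠ 'o') (s : List Char) :
    PySem.Chars.replace (s.flatMap (subst P)) [c] [c, 'o', c]
      = s.flatMap (subst (P ++ [c])) := by
  rw [replace_single, List.flatMap_assoc]
  apply List.flatMap_congr
  intro x _
  unfold subst
  by_cases hxP : x ∈ P
  · have hxc : x ≠ c := fun h => hc (h ▸ hxP)
    simp [hxP, hxc, Ne.symm hco]
  · by_cases hxc : x = c
    · subst hxc
      simp [hxP]
    · simp [hxP, hxc]

-- folding the per-consonant passes over cs equals one character-wise substitution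
theorem fold_replace (cs : List Char) :
    ∀ (P : List Char), (P ++ cs).Nodup → 'o' ∉ cs → ∀ (s : List Char),
      cs.foldl (fun l c => PySem.Chars.replace l [c] [c, 'o', c]) (s.flatMap (subst P))
        = s.flatMap (subst (P ++ cs)) := by
  induction cs with
  | nil => intro P _ _ s; simp
  | cons c t ih =>
    intro P hnd ho s
    have hc : c ∉ P := fun h => ((List.nodup_append.mp hnd).2.2 c h c (by simp)) rfl
    have hco : c ≠ 'o' := fun h => ho (by simp [h])
    simp only [List.foldl_cons]
    rw [subst_step P c hc hco s]
    have hnd' : ((P ++ [c]) ++ t).Nodup := by simpa [List.append_assoc] using hnd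
    have := ih (P ++ [c]) hnd' (fun h => ho (by simp [h])) s
    rw [this]
    simp [List.append_assoc]

-- move B's String-level fold to the List Char level
theorem alt_toList_fold :
    ∀ (cs : List Char) (s : String),
      (cs.foldl (fun s c => PySem.Str.replace s (String.ofList [c]) (String.ofList [c, 'o', c])) s).toList
        = cs.foldl (fun l c => PySem.Chars.replace l [c] [c, 'o', c]) s.toList := by
  intro cs
  induction cs with
  | nil => intro s; simp
  | cons c t ih =>
    intro s
    simp only [List.foldl_cons]
    rw [ih]
    congr 1
    simp [PySem.Str.replace]

-- A's fold with accumulator is the same character-wise substitution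
theorem a_fold (l : List Char) :
    ∀ acc : List Char,
      l.foldl (fun new_str i =>
        if ASLI.toList.contains i then new_str ++ [i, 'o', i] else new_str ++ [i]) acc
        = acc ++ l.flatMap (subst ASLI.toList) := by
  induction l with
  | nil => intro acc; simp
  | cons x t ih =>
    intro acc
    simp only [List.foldl_cons, List.flatMap_cons, ih, subst]
    by_cases hx : x ∈ ASLI.toList <;> simp [hx]

-- ===== VERDICT (by name: the statement is the Claim_ definition above) =====
theorem ASLINATOR6000_spec : Claim_equal_ASLINATOR6000 := by
  intro stri _
  unfold Spec_ASLINATOR6000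
  have hB : (ASLINATOR6000_alt stri).toList = stri.toList.flatMap (subst ASLI.toList) := by
    unfold ASLINATOR6000_alt
    rw [alt_toList_fold]
    have hfold := fold_replace ASLI.toList [] (by decide) (by decide) stri.toList
    have h0 : stri.toList.flatMap (subst ([] : List Char)) = stri.toList := by
      induction stri.toList with
      | nil => rfl
      | cons x t ih => simp [subst, ih]
    rw [h0] at hfold
    exact hfold
  have hA : ASLINATOR6000 stri = String.ofList (stri.toList.flatMap (subst ASLI.toList)) := by
    unfold ASLINATOR6000
    rw [a_fold stri.toList []]
    simp
  rw [hA, ← hB]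
  exact String.ofList_toList
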